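-- pv_equiv track=rewrite | github.com/olivena/course-projects | Ace-of-SPADE/Code/aos.py | preprocess_plaintext
-- ===== SOURCE A (Python) =====
-- def preprocess_plaintext(plaintext, n, q):
--     #Convert plaintext to binary
--     binary = ''.join(format(ord(char), '08b') for char in plaintext)
--
--     #Map binary to polynomial coefficients
--     coefficients = [int(bit) for bit in binary]
--
--     #Pad or truncate to fit degree n-1
--     if len(coefficients) > n:
--         coefficients = coefficients[:n]
--     else:
--         coefficients += [0] * (n - len(coefficients))
--
--     #Reduce coefficients modulo q
--     coefficients = [coef % q for coef in coefficients]
--     return coefficients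
-- ===== SOURCE B (Python) =====
-- def preprocess_plaintext(plaintext, n, q):
--     # Single streaming pass: emit each bit (already reduced mod q), stop at n, then pad.
--     coefficients = []
--     for char in plaintext:
--         if len(coefficients) >= n:
--             break
--         c = ord(char)
--         for i in range(7, -1, -1):
--             if len(coefficients) >= n:
--                 break
--             coefficients.append(((c >> i) & 1) % q)
--     coefficients.extend(0 for _ in range(n - len(coefficients)))
--     return coefficients
-- ===== Notes on version B (the rewrite author's own statement) =====
-- stated objective: faster
-- what changed: Replaces A's multi-pass pipeline (build the whole bit string via format(), map every character to an int, then slice or pad, then a final mod pass) with a single streaming pass that derives each bit arithmetically, emits it already reduced mod q, and stops as soon as n coefficients exist, then pads.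
-- intended difference: On n < 0 with more than -n plaintext bits, A's coefficients[:n] negative slice accidentally returns the first 8*len(plaintext)+n bits, while B returns the empty list, the intended result for a nonsensical negative coefficient count. — e.g. on preprocess_plaintext("A", -1, 3): A returns [0, 1, 0, 0, 0, 0, 0], B returns []
import Mathlib
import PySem

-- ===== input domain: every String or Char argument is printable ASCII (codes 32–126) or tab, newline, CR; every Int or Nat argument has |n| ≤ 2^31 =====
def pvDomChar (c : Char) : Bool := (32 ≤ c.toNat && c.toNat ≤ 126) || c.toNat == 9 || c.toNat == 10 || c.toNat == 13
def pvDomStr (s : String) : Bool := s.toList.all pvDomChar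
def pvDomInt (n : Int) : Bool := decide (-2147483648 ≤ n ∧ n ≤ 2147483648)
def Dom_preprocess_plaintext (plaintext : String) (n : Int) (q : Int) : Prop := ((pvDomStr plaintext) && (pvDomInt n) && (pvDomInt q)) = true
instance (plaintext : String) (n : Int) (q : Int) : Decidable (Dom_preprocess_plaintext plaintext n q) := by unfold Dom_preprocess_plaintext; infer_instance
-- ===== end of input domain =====

-- B replaces A's multi-pass pipeline (build whole bit string, then slice/pad, then mod) by
-- one early-stopping streaming pass over the characters (measured faster in a timing run).

-- ===== PORT A =====
-- format(m, '08b'): binary digits of m, zero-padded on the left to width 8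
def pvFmt8 (m : Nat) : List Char :=
  let s := Nat.toDigits 2 m
  List.replicate (8 - s.length) '0' ++ s

-- int(bit) — exact for the digit characters '0'/'1' that pvFmt8 produces
def pvInt1 (c : Char) : Int := if c = '1' then 1 else 0

def preprocess_plaintext (plaintext : String) (n : Int) (q : Int) : List Int :=
  let binary : List Char := plaintext.toList.flatMap (fun ch => pvFmt8 ch.toNat)
  let coefficients : List Int := binary.map pvInt1
  let coefficients :=
    if (coefficients.length : Int) > n then
      PySem.List.slice coefficients none (some n)
    else
      coefficients ++ List.replicate ((n - (coefficients.length : Int)).toNat) 0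
  coefficients.map (fun coef => PySem.Int.mod coef q)

-- ===== PORT B =====
-- (c >> i) & 1
def pvBit (m i : Nat) : Int := (((m >>> i) &&& 1 : Nat) : Int)

-- inner loop of Source B: for i in range(7,-1,-1): break at n, append ((c>>i)&1) % q
def pvAltChar (n q : Int) (m : Nat) (acc : List Int) : List Int :=
  [7, 6, 5, 4, 3, 2, 1, 0].foldl
    (fun a i => if n ≤ (a.length : Int) then a else a ++ [PySem.Int.mod (pvBit m i) q]) acc

def preprocess_plaintext_alt (plaintext : String) (n : Int) (q : Int) : List Int :=
  let coefficients :=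
    plaintext.toList.foldl
      (fun a ch => if n ≤ (a.length : Int) then a else pvAltChar n q ch.toNat a) []
  coefficients ++ List.replicate ((n - (coefficients.length : Int)).toNat) 0

-- ===== PRECONDITION & SPEC =====
-- Pre_ admits exactly the inputs on which A returns: q = 0 raises ZeroDivisionError in
-- A's final '% q' pass, except when the coefficient list is empty (n = 0, or n < 0 with
-- at most -n plaintext bits), where A returns [] without ever dividing.
def Pre_preprocess_plaintext (plaintext : String) (n : Int) (q : Int) : Prop :=
  q ≠ 0 ∨ n = 0 ∨ (n < 0 ∧ 8 * (plaintext.toList.length : Int) + n ≤ 0)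
instance (plaintext : String) (n : Int) (q : Int) : Decidable (Pre_preprocess_plaintext plaintext n q) := by
  unfold Pre_preprocess_plaintext; infer_instance

def pvWitness_preprocess_plaintext : String × Int × Int := ("ab", 3, 5)

-- On n < 0 with more than -n plaintext bits, A's slice coefficients[:n] wraps around and
-- returns the first 8*len(plaintext)+n bits, an accident of Python's negative slicing; B
-- returns the empty polynomial, the intended value for a nonsensical negative degree bound.
def D_preprocess_plaintext (plaintext : String) (n : Int) (q : Int) : Prop :=
  n < 0 ∧ 0 < 8 * (plaintext.toList.length : Int) + n
instance (plaintext : String) (n : Int) (q : Int) : Decidable (D_preprocess_plaintext plaintext n q) := by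
  unfold D_preprocess_plaintext; infer_instance

def Spec_preprocess_plaintext (plaintext : String) (n : Int) (q : Int) (out : List Int) : Prop :=
  ¬ D_preprocess_plaintext plaintext n q → out = preprocess_plaintext_alt plaintext n q
instance (plaintext : String) (n : Int) (q : Int) (out : List Int) : Decidable (Spec_preprocess_plaintext plaintext n q out) := by
  unfold Spec_preprocess_plaintext; infer_instance

def pvDiffWitness_preprocess_plaintext : String × Int × Int := ("A", -1, 3)
def pvDiffWitnessOut_preprocess_plaintext : (List Int) × (List Int) := ([0, 1, 0, 0, 0, 0, 0], [])

-- ===== CLAIM (what is proved, stated in full; the proofs are below) =====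
def Claim_unchanged_preprocess_plaintext : Prop := ∀ (plaintext : String) (n : Int) (q : Int), Dom_preprocess_plaintext plaintext n q → Pre_preprocess_plaintext plaintext n q → Spec_preprocess_plaintext plaintext n q (preprocess_plaintext plaintext n q)
def Claim_changed_preprocess_plaintext : Prop := Dom_preprocess_plaintext (pvDiffWitness_preprocess_plaintext.1) (pvDiffWitness_preprocess_plaintext.2.1) (pvDiffWitness_preprocess_plaintext.2.2) ∧ Pre_preprocess_plaintext (pvDiffWitness_preprocess_plaintext.1) (pvDiffWitness_preprocess_plaintext.2.1) (pvDiffWitness_preprocess_plaintext.2.2) ∧ D_preprocess_plaintext (pvDiffWitness_preprocess_plaintext.1) (pvDiffWitness_preprocess_plaintext.2.1) (pvDiffWitness_preprocess_plaintext.2.2) ∧ preprocess_plaintext (pvDiffWitness_preprocess_plaintext.1) (pvDiffWitness_preprocess_plaintext.2.1) (pvDiffWitness_preprocess_plaintext.2.2) = pvDiffWitnessOut_preprocess_plaintext.1 ∧ preprocess_plaintext_alt (pvDiffWitness_preprocess_plaintext.1) (pvDiffWitness_preprocess_plaintext.2.1) (pvDiffWitness_preprocess_plaintext.2.2) = pvDiffWitnessOut_preprocess_plaintext.2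 ∧ pvDiffWitnessOut_preprocess_plaintext.1 ≠ pvDiffWitnessOut_preprocess_plaintext.2
def Claim_exact_preprocess_plaintext : Prop := ∀ (plaintext : String) (n : Int) (q : Int), Dom_preprocess_plaintext plaintext n q → Pre_preprocess_plaintext plaintext n q → D_preprocess_plaintext plaintext n q → preprocess_plaintext plaintext n q ≠ preprocess_plaintext_alt plaintext n q

-- ===== LEMMAS AND PROOFS =====

-- raw 8-bit chunk of one character
def pvChunk (m : Nat) : List Int := [7, 6, 5, 4, 3, 2, 1, 0].map (pvBit m)

-- A's formatted digits, read back as ints, are exactly the 8 arithmetic bits (codes < 128)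
theorem pvFmt8_map (m : Nat) (h : m < 128) : (pvFmt8 m).map pvInt1 = pvChunk m := by
  have : ∀ m : Fin 128, (pvFmt8 m.val).map pvInt1 = pvChunk m.val := by decide
  exact this ⟨m, h⟩

theorem pvChunk_length (m : Nat) : (pvChunk m).length = 8 := by rfl

-- guarded fold with singleton appends = take of the mapped list
theorem pv_guard_fold {α : Type} (n : Int) (f : α → Int) :
    ∀ (l : List α) (acc : List Int),
      l.foldl (fun a x => if n ≤ (a.length : Int) then a else a ++ [f x]) acc
        = acc ++ (l.map f).take ((n - (acc.length : Int)).toNat) := by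
  intro l
  induction l with
  | nil => intro acc; simp
  | cons x xs ih =>
    intro acc
    by_cases h : n ≤ (acc.length : Int)
    · have h0 : (n - (acc.length : Int)).toNat = 0 := by omega
      simp only [List.foldl_cons, if_pos h, ih acc, h0, List.take_zero, List.append_nil]
    · have h1 : (n - (acc.length : Int)).toNat
          = (n - ((acc ++ [f x]).length : Int)).toNat + 1 := by
        simp only [List.length_append, List.length_cons, List.length_nil]
        omega
      simp only [List.foldl_cons, if_neg h, ih (acc ++ [f x]), h1, List.map_cons,
        List.take_succ_cons, List.append_assoc, List.cons_append, List.nil_append]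

theorem pvAltChar_eq (n q : Int) (m : Nat) (acc : List Int) :
    pvAltChar n q m acc
      = acc ++ ((pvChunk m).map (fun x => PySem.Int.mod x q)).take ((n - (acc.length : Int)).toNat) := by
  unfold pvAltChar pvChunk
  rw [pv_guard_fold n (fun i => PySem.Int.mod (pvBit m i) q), List.map_map]
  rfl

-- outer guarded fold = take of the flattened mod-reduced bit stream
theorem pv_outer_fold (n q : Int) :
    ∀ (l : List Char) (acc : List Int),
      l.foldl (fun a ch => if n ≤ (a.length : Int) then a else pvAltChar n q ch.toNat a) acc
        = acc ++ ((l.flatMap fun ch => (pvChunk ch.toNat).map (fun x => PySem.Int.mod x q)).take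
            ((n - (acc.length : Int)).toNat)) := by
  intro l
  induction l with
  | nil => intro acc; simp
  | cons c cs ih =>
    intro acc
    by_cases h : n ≤ (acc.length : Int)
    · have h0 : (n - (acc.length : Int)).toNat = 0 := by omega
      simp only [List.foldl_cons, if_pos h, ih acc, h0, List.take_zero, List.append_nil]
    · rw [List.foldl_cons, if_neg h, pvAltChar_eq, ih, List.flatMap_cons,
        List.take_append, ← List.append_assoc]
      congr 2
      simp only [List.length_append, List.length_take, List.length_map, pvChunk_length]
      omega

-- B in closed form
theorem pvAlt_closed (plaintext : String) (n q : Int) :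
    preprocess_plaintext_alt plaintext n q
      = ((plaintext.toList.flatMap fun ch => pvChunk ch.toNat).map (fun x => PySem.Int.mod x q)).take n.toNat
        ++ List.replicate
            ((n - ((((plaintext.toList.flatMap fun ch => pvChunk ch.toNat).map
                (fun x => PySem.Int.mod x q)).take n.toNat).length : Int)).toNat) 0 := by
  unfold preprocess_plaintext_alt
  rw [pv_outer_fold]
  simp only [List.nil_append, List.length_nil, Nat.cast_zero, sub_zero]
  rw [← List.map_flatMap]

-- A's raw bit list equals the arithmetic bit stream on Dom
theorem pvBinary_eq_list : ∀ l : List Char, l.all pvDomChar = true →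
    (l.flatMap fun ch => pvFmt8 ch.toNat).map pvInt1 = l.flatMap fun ch => pvChunk ch.toNat := by
  intro l
  induction l with
  | nil => intro _; simp
  | cons c cs ih =>
    intro hd
    simp only [List.all_cons, Bool.and_eq_true] at hd
    have hlt : c.toNat < 128 := by
      have hcd := hd.1
      unfold pvDomChar at hcd
      simp only [Bool.or_eq_true, Bool.and_eq_true, decide_eq_true_eq, beq_iff_eq] at hcd
      omega
    simp only [List.flatMap_cons, List.map_append, ih hd.2, pvFmt8_map c.toNat hlt]

theorem pvBinary_eq (plaintext : String) (hd : pvDomStr plaintext = true) :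
    (plaintext.toList.flatMap fun ch => pvFmt8 ch.toNat).map pvInt1
      = plaintext.toList.flatMap fun ch => pvChunk ch.toNat :=
  pvBinary_eq_list plaintext.toList hd

theorem pv_mod_zero (q : Int) : PySem.Int.mod 0 q = 0 := by
  simp [PySem.Int.mod]

-- ===== VERDICT (by name: the statement is the Claim_ definition above) =====
theorem preprocess_plaintext_spec : Claim_unchanged_preprocess_plaintext := by
  intro plaintext n q hdom _ hnd
  have hds : pvDomStr plaintext = true := by
    unfold Dom_preprocess_plaintext at hdom
    simp only [Bool.and_eq_true] at hdom
    exact hdom.1.1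
  unfold D_preprocess_plaintext at hnd
  set bits := plaintext.toList.flatMap fun ch => pvChunk ch.toNat with hbits
  have hlen : (bits.length : Int) = 8 * (plaintext.toList.length : Int) := by
    rw [hbits, List.length_flatMap]
    induction plaintext.toList with
    | nil => simp
    | cons c cs ih => simp only [List.map_cons, List.sum_cons, pvChunk_length, List.length_cons] at *; push_cast at *; omega
  unfold preprocess_plaintext
  rw [pvAlt_closed]
  simp only [pvBinary_eq plaintext hds, ← hbits]
  by_cases hn : 0 ≤ n
  · rw [PySem.List.slice_to _ hn]
    by_cases hgt : (bits.length : Int) > n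
    · rw [if_pos hgt]
      have hmin : (bits.take n.toNat).length = n.toNat := by
        simp only [List.length_take]
        omega
      rw [← List.map_take]
      have hz : (n - (((List.take n.toNat bits).map (fun coef => PySem.Int.mod coef q)).length : Int)).toNat = 0 := by
        simp only [List.length_map, List.length_take]; omega
      rw [hz, List.replicate_zero, List.append_nil]
    · rw [if_neg hgt]
      have hle : bits.length ≤ n.toNat := by omega
      have htk : (bits.map fun coef => PySem.Int.mod coef q).take n.toNat
          = bits.map fun coef => PySem.Int.mod coef q :=
        List.take_of_length_le (by simpa using hle)
      rw [List.map_append, List.map_replicate, pv_mod_zero q, htk]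
      simp only [List.length_map]
  · -- n < 0, and ¬D gives 8*len + n ≤ 0, so both sides are []
    have hnn : n < 0 := by omega
    have hln : (bits.length : Int) + n ≤ 0 := by
      rw [hlen]; omega
    have hgt : (bits.length : Int) > n := by omega
    rw [if_pos hgt]
    have hsl : PySem.List.slice bits none (some n) = [] := by
      apply List.eq_nil_of_length_eq_zero
      have hk : 0 < (-n).toNat := by omega
      have : n = -(((-n).toNat : Nat) : Int) := by omega
      rw [this, PySem.List.slice_to_neg_natCast _ _ hk]
      simp only [List.length_take]
      omega
    have hto : n.toNat = 0 := by omega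
    rw [hsl, hto]
    simp only [List.take_zero, List.map_nil, List.length_nil, List.nil_append,
      Nat.cast_zero, sub_zero, hto, List.replicate_zero]

theorem preprocess_plaintext_changed : Claim_changed_preprocess_plaintext := by
  unfold Claim_changed_preprocess_plaintext; decide

theorem preprocess_plaintext_tight : Claim_exact_preprocess_plaintext := by
  intro plaintext n q hdom _ hd
  unfold D_preprocess_plaintext at hd
  obtain ⟨hn, hpos⟩ := hd
  have hds : pvDomStr plaintext = true := by
    unfold Dom_preprocess_plaintext at hdom
    simp only [Bool.and_eq_true] at hdom
    exact hdom.1.1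
  set bits := plaintext.toList.flatMap fun ch => pvChunk ch.toNat with hbits
  have hlen : (bits.length : Int) = 8 * (plaintext.toList.length : Int) := by
    rw [hbits, List.length_flatMap]
    induction plaintext.toList with
    | nil => simp
    | cons c cs ih => simp only [List.map_cons, List.sum_cons, pvChunk_length, List.length_cons] at *; push_cast at *; omega
  -- B = []
  have hB : preprocess_plaintext_alt plaintext n q = [] := by
    rw [pvAlt_closed]
    have hto : n.toNat = 0 := by omega
    rw [hto]
    simp only [List.take_zero, List.length_nil, List.nil_append,
      Nat.cast_zero, sub_zero, hto, List.replicate_zero]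
  -- A ≠ []
  have hA : preprocess_plaintext plaintext n q ≠ [] := by
    unfold preprocess_plaintext
    simp only [pvBinary_eq plaintext hds, ← hbits]
    have hgt : (bits.length : Int) > n := by omega
    rw [if_pos hgt]
    intro hcon
    have hlen0 := congrArg List.length hcon
    simp only [List.length_map, List.length_nil] at hlen0
    have hk : 0 < (-n).toNat := by omega
    have hneq : n = -(((-n).toNat : Nat) : Int) := by omega
    rw [hneq, PySem.List.slice_to_neg_natCast _ _ hk] at hlen0
    simp only [List.length_take] at hlen0
    omega
  rw [hB]
  exact hA
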